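-- pv_equiv track=rewrite | github.com/HajarBel04/TravelBot | enhanced_proposal_generator.py | _clean_itinerary_format
-- ===== SOURCE A (Python) =====
-- def _clean_itinerary_format(itinerary):
--     """
--     Remove email-like formatting from the itinerary.
--
--     Args:
--         itinerary: The generated itinerary text
--
--     Returns:
--         str: Cleaned itinerary text
--     """
--     # Remove email-like greetings
--     lines = itinerary.split('\n')
--     cleaned_lines = []
--     skip_line = False
--
--     for line in lines:
--         # Skip common email greeting patterns
--         if any(greeting in line.lower() for greeting in ['dear', 'hello', 'hi ', 'greetings', 'thank you', 'regards', 'sincerely']):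
--             skip_line = True
--             continue
--
--         # If we were skipping lines and found a meaningful header, start including again
--         if skip_line and (line.startswith('#') or line.startswith('## ')):
--             skip_line = False
--
--         if not skip_line:
--             cleaned_lines.append(line)
--
--     return '\n'.join(cleaned_lines)
-- ===== SOURCE B (Python) =====
-- _GREETINGS = ['dear', 'hello', 'hi ', 'greetings', 'thank you', 'regards', 'sincerely']
--
--
-- def _is_greeting(line):
--     low = line.lower()
--     return any(g in low for g in _GREETINGS)
--
--
-- def _clean_itinerary_format(itinerary):
--     """Index-based traversal: a greeting line starts an inner skip loop that
--     advances past greetings and non-header lines, stopping at the first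
--     non-greeting line starting with '#'."""
--     lines = itinerary.split('\n')
--     cleaned = []
--     i = 0
--     n = len(lines)
--     while i < n:
--         line = lines[i]
--         if _is_greeting(line):
--             i += 1
--             while i < n:
--                 nxt = lines[i]
--                 if _is_greeting(nxt) or not nxt.startswith('#'):
--                     i += 1
--                 else:
--                     break
--             continue
--         cleaned.append(line)
--         i += 1
--     return '\n'.join(cleaned)
-- ===== Notes on version B (the rewrite author's own statement) =====
-- stated objective: alternative
-- what changed: Replaces the flag-carrying single loop (skip_line boolean threaded through every iteration) with an index-based outer loop that, on a greeting line, runs an inner skip loop advancing past greetings and non-header lines until the next hash-prefixed header, then resumes normal appending.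
import Mathlib
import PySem

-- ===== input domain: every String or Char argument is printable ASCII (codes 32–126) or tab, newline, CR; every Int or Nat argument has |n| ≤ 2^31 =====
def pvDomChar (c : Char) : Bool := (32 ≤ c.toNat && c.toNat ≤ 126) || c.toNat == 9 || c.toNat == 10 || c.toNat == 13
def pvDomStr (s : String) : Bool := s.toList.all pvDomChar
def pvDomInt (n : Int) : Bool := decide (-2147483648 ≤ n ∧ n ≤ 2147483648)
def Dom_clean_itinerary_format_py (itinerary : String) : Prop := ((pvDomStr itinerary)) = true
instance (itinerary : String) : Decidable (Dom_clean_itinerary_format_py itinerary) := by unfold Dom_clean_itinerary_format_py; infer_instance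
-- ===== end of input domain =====

-- B restructures A's flag-threaded loop into an outer traversal with an inner skip loop; same value, no speed claim.

-- ===== PORT A =====
-- the greeting substrings, and 'any(greeting in line.lower() for greeting in [...])'
def pvGreetings : List String := ["dear", "hello", "hi ", "greetings", "thank you", "regards", "sincerely"]

def pvIsGreetingA (line : String) : Bool :=
  pvGreetings.any (fun g => PySem.Str.isIn g (PySem.Str.lower line))

-- one iteration of A's for-loop: state = (skip_line, cleaned_lines)
def pvStepA (st : Bool × List String) (line : String) : Bool × List String :=
  if pvIsGreetingA line then (true, st.2)
  else
    let skip := if st.1 && (PySem.Str.startswith line "#" || PySem.Str.startswith line "## ") then false else st.1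
    if !skip then (skip, st.2 ++ [line]) else (skip, st.2)

def clean_itinerary_format_py (itinerary : String) : String :=
  let lines := (PySem.Str.split? itinerary "\n").getD []   -- sep "\n" ≠ "", so split? is some
  PySem.Str.join "\n" (lines.foldl pvStepA (false, [])).2

-- ===== PORT B =====
def pvIsGreetingB (line : String) : Bool :=
  pvGreetings.any (fun g => PySem.Str.isIn g (PySem.Str.lower line))

-- B's inner while loop: advance past greetings and non-'#' lines, return the rest at the break
def pvSkipB : List String → List String
  | [] => []
  | l :: rest =>
      if pvIsGreetingB l || !(PySem.Str.startswith l "#") then pvSkipB rest else l :: rest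

theorem pvSkipB_length_le : ∀ ls : List String, (pvSkipB ls).length ≤ ls.length := by
  intro ls
  induction ls with
  | nil => simp [pvSkipB]
  | cons l rest ih =>
      simp only [pvSkipB]
      split
      · exact Nat.le_succ_of_le ih
      · simp

-- B's outer while loop over the remaining lines
def pvOuterB : List String → List String
  | [] => []
  | l :: rest =>
      if pvIsGreetingB l then pvOuterB (pvSkipB rest)
      else l :: pvOuterB rest
termination_by ls => ls.length
decreasing_by
  · exact Nat.lt_succ_of_le (pvSkipB_length_le rest)
  · simp

def clean_itinerary_format_py_alt (itinerary : String) : String :=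
  let lines := (PySem.Str.split? itinerary "\n").getD []   -- sep "\n" ≠ "", so split? is some
  PySem.Str.join "\n" (pvOuterB lines)

-- ===== PRECONDITION & SPEC =====
def Spec_clean_itinerary_format_py (itinerary : String) (out : String) : Prop := out = clean_itinerary_format_py_alt itinerary
instance (itinerary : String) (out : String) : Decidable (Spec_clean_itinerary_format_py itinerary out) := by unfold Spec_clean_itinerary_format_py; infer_instance

-- ===== CLAIM (what is proved, stated in full; the proofs are below) =====
def Claim_equal_clean_itinerary_format_py : Prop := ∀ (itinerary : String), Dom_clean_itinerary_format_py itinerary → Spec_clean_itinerary_format_py itinerary (clean_itinerary_format_py itinerary)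

-- ===== LEMMAS AND PROOFS =====

theorem pvGreeting_eq (l : String) : pvIsGreetingA l = pvIsGreetingB l := rfl

-- a line starting with "## " starts with "#", so A's disjunction collapses to startswith "#"
theorem pvStarts_hash (l : String) (h : PySem.Str.startswith l "#" = false) :
    PySem.Str.startswith l "## " = false := by
  cases h3 : PySem.Str.startswith l "## " with
  | false => rfl
  | true =>
      exfalso
      have hp : ("## ".toList) <+: l.toList :=
        (PySem.Chars.startswith_iff l.toList "## ".toList).mp (by simpa using h3)
      have hp1 : ("#".toList) <+: l.toList := List.IsPrefix.trans (by decide) hp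
      have : PySem.Str.startswith l "#" = true := by
        simp only [PySem.Str.startswith_eq]
        exact (PySem.Chars.startswith_iff _ _).mpr hp1
      rw [h] at this
      exact absurd this (by simp)

-- A in skip mode equals A in normal mode restarted after B's inner skip loop
theorem pvFoldA_skip (ls : List String) : ∀ acc : List String,
    (ls.foldl pvStepA (true, acc)).2 = ((pvSkipB ls).foldl pvStepA (false, acc)).2 := by
  induction ls with
  | nil => intro acc; simp [pvSkipB]
  | cons l rest ih =>
      intro acc
      cases hg : pvIsGreetingA l with
      | true =>
          have hg' : pvIsGreetingB l = true := (pvGreeting_eq l) ▸ hg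
          simp [pvSkipB, pvStepA, hg, hg', ih acc]
      | false =>
          have hg' : pvIsGreetingB l = false := (pvGreeting_eq l) ▸ hg
          cases hh : PySem.Str.startswith l "#" with
          | true =>
              have hC : PySem.Chars.startswith l.toList ['#'] = true := by simpa using hh
              simp [pvSkipB, pvStepA, hg, hg', hC]
          | false =>
              have hC : PySem.Chars.startswith l.toList ['#'] = false := by simpa using hh
              have hC2 : PySem.Chars.startswith l.toList ['#','#',' '] = false := by
                simpa using pvStarts_hash l hh
              simp [pvSkipB, pvStepA, hg, hg', hC, hC2, ih acc]

-- A's whole fold in normal mode produces exactly B's outer-loop output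
theorem pvFoldA_eq_outerB (ls : List String) : ∀ acc : List String,
    (ls.foldl pvStepA (false, acc)).2 = acc ++ pvOuterB ls := by
  match ls with
  | [] => intro acc; simp [pvOuterB]
  | l :: rest =>
      intro acc
      cases hg : pvIsGreetingA l with
      | true =>
          have hg' : pvIsGreetingB l = true := (pvGreeting_eq l) ▸ hg
          have h1 := pvFoldA_skip rest acc
          have h2 := pvFoldA_eq_outerB (pvSkipB rest) acc
          simp only [pvOuterB, hg', if_true]
          simp [pvStepA, hg, h1, h2]
      | false =>
          have hg' : pvIsGreetingB l = false := (pvGreeting_eq l) ▸ hg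
          have h2 := pvFoldA_eq_outerB rest (acc ++ [l])
          simp [pvOuterB, pvStepA, hg, hg', h2]
termination_by ls.length
decreasing_by
  all_goals
    have := pvSkipB_length_le rest
    simp only [List.length_cons]
    omega

theorem pvClean_eq (itinerary : String) :
    clean_itinerary_format_py itinerary = clean_itinerary_format_py_alt itinerary := by
  show PySem.Str.join "\n"
      (((PySem.Str.split? itinerary "\n").getD []).foldl pvStepA (false, [])).2
    = PySem.Str.join "\n" (pvOuterB ((PySem.Str.split? itinerary "\n").getD []))
  rw [pvFoldA_eq_outerB]
  rfl

-- ===== VERDICT (by name: the statement is the Claim_ definition above) =====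
theorem clean_itinerary_format_py_spec : Claim_equal_clean_itinerary_format_py := by
  intro it _
  unfold Spec_clean_itinerary_format_py
  exact pvClean_eq it
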